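-- pv_equiv track=rewrite | github.com/aborshy/code_advent_2021 | Advent of Code 2015/Day 3/solution.py | solution
-- ===== SOURCE A (Python) =====
-- def solution(file_lines: list[str]) -> int:
--     """
--     --- Part Two ---
--     The next year, to speed up the process, Santa creates a robot version of himself, Robo-Santa,
--     to deliver presents with him.
--
--     Santa and Robo-Santa start at the same location (delivering two presents to the same starting house),
--     then take turns moving based on instructions from the elf,
--     who is eggnoggedly reading from the same script as the previous year.
--
--     This year, how many houses receive at least one present?
--
--     Args:
--         file_lines: List of lines from input file
--
--     Returns: Int of total gifts given.
--
--     """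
--     instructions = {
--         "<": (-1, 0),
--         ">": (1, 0),
--         "v": (0, -1),
--         "^": (0, 1)
--     }
--
--     locations = {(0, 0): (0, 0)}
--
--     class Santa:
--
--         def __init__(self):
--             self.x = 0
--             self.y = 0
--             self.total = 0
--
--         def move(self, direction, locations):
--             self.x += instructions[direction][0]
--             self.y += instructions[direction][1]
--             if (self.x, self.y) not in locations:
--                 self.total += 1
--                 locations[(self.x, self.y)] = (self.x, self.y)
--             return locations
--
--     robosanta = Santa()
--     santa = Santa()
--
--     for n, direct in enumerate(file_lines[0], 1):
--         if n % 2 != 0: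
--             santa.move(direct, locations)
--         else:
--             robosanta.move(direct, locations)
--
--     return robosanta.total + santa.total + 1
-- ===== SOURCE B (Python) =====
-- def solution(file_lines: list[str]) -> int:
--     """Split the instructions by parity into Santa's and Robo's private move
--     lists, build each walker's full path independently, and count the union
--     of the two path sets."""
--     deltas = {
--         "<": (-1, 0),
--         ">": (1, 0),
--         "v": (0, -1),
--         "^": (0, 1)
--     }
--     line = file_lines[0]
--
--     def path(moves):
--         x = y = 0
--         pts = [(0, 0)]
--         for c in moves:
--             dx, dy = deltas[c]
--             x += dx
--             y += dy
--             pts.append((x, y))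
--         return pts
--
--     return len(set(path(line[0::2])) | set(path(line[1::2])))
-- ===== Notes on version B (the rewrite author's own statement) =====
-- stated objective: alternative
-- what changed: Instead of A's single alternating pass with a Santa class, a shared self-mapping dict and two incremental counters, B first splits the instruction string by index parity into the two movers' private move lists via slicing, builds each walker's full path independently as a plain position list, and counts the union of the two path sets once at the end.
import Mathlib
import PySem

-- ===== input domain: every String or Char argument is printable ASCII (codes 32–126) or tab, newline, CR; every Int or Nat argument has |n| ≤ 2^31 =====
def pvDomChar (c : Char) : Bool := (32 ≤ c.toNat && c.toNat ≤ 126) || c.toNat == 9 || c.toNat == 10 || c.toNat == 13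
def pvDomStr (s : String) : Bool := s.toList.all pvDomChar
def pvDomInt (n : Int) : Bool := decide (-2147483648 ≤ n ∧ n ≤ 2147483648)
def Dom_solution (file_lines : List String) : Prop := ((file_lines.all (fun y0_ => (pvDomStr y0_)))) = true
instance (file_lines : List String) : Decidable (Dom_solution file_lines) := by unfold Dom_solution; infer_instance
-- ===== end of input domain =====

-- B replaces A's single alternating pass (Santa class, shared self-mapping dict, two
-- incremental counters) by parity slicing: each mover's move list is cut out with
-- line[0::2] / line[1::2], the two full paths are built independently, and the answer
-- is the size of the union of the two path sets; objective: alternative.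

-- ===== PORT A =====
def pvInstructionsA : PySem.Dict Char (Int × Int) :=
  PySem.Dict.ofList [('<', (-1, 0)), ('>', (1, 0)), ('v', (0, -1)), ('^', (0, 1))]

-- Santa.move: getD's default (0,0) is never read inside Pre_ (Python raises KeyError there)
def pvMoveA (st : Int × Int × Int) (c : Char) (locs : PySem.Dict (Int × Int) (Int × Int)) :
    (Int × Int × Int) × PySem.Dict (Int × Int) (Int × Int) :=
  let d := pvInstructionsA.getD c (0, 0)
  let x := st.1 + d.1
  let y := st.2.1 + d.2
  if locs.contains (x, y) then ((x, y, st.2.2), locs)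
  else ((x, y, st.2.2 + 1), locs.insert (x, y) (x, y))

-- loop body: state = (santa, robosanta, locations)
def pvStepA (st : (Int × Int × Int) × (Int × Int × Int) × PySem.Dict (Int × Int) (Int × Int))
    (p : Int × Char) :
    (Int × Int × Int) × (Int × Int × Int) × PySem.Dict (Int × Int) (Int × Int) :=
  if PySem.Int.mod p.1 2 ≠ 0 then
    let r := pvMoveA st.1 p.2 st.2.2
    (r.1, st.2.1, r.2)
  else
    let r := pvMoveA st.2.1 p.2 st.2.2
    (st.1, r.1, r.2)

def solution (file_lines : List String) : Int :=
  match PySem.List.pyGet? file_lines 0 with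
  | none => 0  -- IndexError in Python; excluded by Pre_
  | some line =>
    let fin := (PySem.List.enumerate line.toList 1).foldl pvStepA
      ((0, 0, 0), (0, 0, 0), PySem.Dict.ofList [(((0 : Int), (0 : Int)), ((0 : Int), (0 : Int)))])
    fin.2.1.2.2 + fin.1.2.2 + 1

-- ===== PORT B =====
-- deltas[c]; default (0,0) never read inside Pre_ (Python raises KeyError there)
def pvDeltaB (c : Char) : Int × Int :=
  PySem.Dict.getD
    (PySem.Dict.ofList [('<', (-1, 0)), ('>', (1, 0)), ('v', (0, -1)), ('^', (0, 1))]) c (0, 0)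

-- def path(moves): walk from the origin, collecting every position incl. the start
def pvPathB (moves : List Char) : List (Int × Int) :=
  (moves.foldl
    (fun st c =>
      let d := pvDeltaB c
      let x := st.1.1 + d.1
      let y := st.1.2 + d.2
      ((x, y), st.2 ++ [(x, y)]))
    (((0 : Int), (0 : Int)), [((0 : Int), (0 : Int))])).2

def solution_alt (file_lines : List String) : Int :=
  match PySem.List.pyGet? file_lines 0 with
  | none => 0  -- IndexError in Python; excluded by Pre_
  | some line =>
    -- the step is the literal 2, so Python's slices never fail; the .getD [] default is never read
    let santaMoves := (PySem.List.slice? line.toList (some 0) none 2).getD []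
    let roboMoves := (PySem.List.slice? line.toList (some 1) none 2).getD []
    ((PySem.Set.union (PySem.Set.ofList (pvPathB santaMoves))
        (PySem.Set.ofList (pvPathB roboMoves))).length : Int)

-- ===== PRECONDITION & SPEC =====
-- Pre_ excludes the empty list (file_lines[0] raises IndexError) and any character of the
-- first line outside "<>v^" (the instruction-dict lookup raises KeyError).
def Pre_solution (file_lines : List String) : Prop :=
  file_lines.isEmpty = false ∧
    ((file_lines.headD "").toList.all
      (fun c => c == '<' || c == '>' || c == 'v' || c == '^')) = true
instance (file_lines : List String) : Decidable (Pre_solution file_lines) := by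
  unfold Pre_solution; infer_instance

def pvWitness_solution : List String := ["^>v<"]

def Spec_solution (file_lines : List String) (out : Int) : Prop := out = solution_alt file_lines
instance (file_lines : List String) (out : Int) : Decidable (Spec_solution file_lines out) := by
  unfold Spec_solution; infer_instance

-- ===== CLAIM (what is proved, stated in full; the proofs are below) =====
def Claim_equal_solution : Prop := ∀ (file_lines : List String), Dom_solution file_lines → Pre_solution file_lines → Spec_solution file_lines (solution file_lines)

-- ===== LEMMAS AND PROOFS =====

-- elements of a list at even positions (l[0::2]); l[1::2] is pvEvens l.tail
def pvEvens {α : Type} : List α → List α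
  | [] => []
  | [a] => [a]
  | a :: _ :: l => a :: pvEvens l

theorem pvEvens_cons {α : Type} (a : α) (l : List α) :
    pvEvens (a :: l) = a :: pvEvens l.tail := by
  cases l <;> rfl

-- position sequence of a single walker starting at p
def pvPos1 (cs : List Char) (p : Int × Int) : List (Int × Int) :=
  match cs with
  | [] => []
  | c :: cs =>
    let p' := (p.1 + (pvDeltaB c).1, p.2 + (pvDeltaB c).2)
    p' :: pvPos1 cs p'

-- position sequence of the alternating walk: a moves first, then roles swap
def pvPosSwap (cs : List Char) (a b : Int × Int) : List (Int × Int) :=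
  match cs with
  | [] => []
  | c :: cs =>
    let a' := (a.1 + (pvDeltaB c).1, a.2 + (pvDeltaB c).2)
    a' :: pvPosSwap cs b a'

-- the two delta lookups agree on the four legal instruction characters
theorem pv_delta_eq (c : Char) (hc : c = '<' ∨ c = '>' ∨ c = 'v' ∨ c = '^') :
    pvInstructionsA.getD c (0, 0) = pvDeltaB c := by
  rcases hc with h | h | h | h <;> subst h <;> rfl

-- the interleaved walk is a permutation of the two private walks
theorem pv_swap_perm (cs : List Char) (a b : Int × Int) :
    (pvPosSwap cs a b).Perm (pvPos1 (pvEvens cs) a ++ pvPos1 (pvEvens cs.tail) b) := by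
  induction cs generalizing a b with
  | nil => simp [pvPosSwap, pvEvens, pvPos1]
  | cons c cs ih =>
    rw [pvEvens_cons]
    simp only [pvPosSwap, pvPos1, List.tail_cons, List.cons_append]
    exact List.Perm.cons _ ((ih _ _).trans (List.perm_append_comm))

-- membership and nodup of a foldl of Set.add
theorem pv_mem_foldl_add (l : List (Int × Int)) (s : PySem.Set (Int × Int)) (y : Int × Int) :
    y ∈ List.foldl PySem.Set.add s l ↔ y ∈ s ∨ y ∈ l := by
  induction l generalizing s with
  | nil => simp
  | cons x l ih =>
    simp only [List.foldl_cons, ih, PySem.Set.mem_add, List.mem_cons]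
    tauto

theorem pv_nodup_foldl_add (l : List (Int × Int)) (s : PySem.Set (Int × Int))
    (hs : s.Nodup) : (List.foldl PySem.Set.add s l).Nodup := by
  induction l generalizing s with
  | nil => exact hs
  | cons x l ih => exact ih _ (PySem.Set.nodup_add _ _ hs)

-- two nodup lists with the same members have the same length
theorem pv_len_eq (s t : List (Int × Int)) (hs : s.Nodup) (ht : t.Nodup)
    (h : ∀ x, x ∈ s ↔ x ∈ t) : s.length = t.length :=
  (((List.perm_ext_iff_of_nodup hs ht).mpr h)).length_eq

-- n odd iff n+1 even, for Python's mod
theorem pv_parity (n : Int) :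
    (PySem.Int.mod n 2 ≠ 0) ↔ (PySem.Int.mod (n + 1) 2 = 0) := by
  simp only [PySem.Int.mod_eq_emod_of_pos (show (0:Int) < 2 by norm_num)]
  omega

-- loop invariant for A: totals + 1 = size of the visited set after adding the walk's positions
theorem pv_A_fold (cs : List Char)
    (hc : ∀ c ∈ cs, c = '<' ∨ c = '>' ∨ c = 'v' ∨ c = '^')
    (n : Int) (sa ra : Int × Int) (ts tr : Int)
    (locs : PySem.Dict (Int × Int) (Int × Int)) (vis : PySem.Set (Int × Int))
    (hv : vis = locs.keys) (ht : ts + tr + 1 = (vis.length : Int)) :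
    (let fa := (PySem.List.enumerate cs n).foldl pvStepA
        ((sa.1, sa.2, ts), (ra.1, ra.2, tr), locs)
     fa.2.1.2.2 + fa.1.2.2 + 1)
    = ((List.foldl PySem.Set.add vis
        (if PySem.Int.mod n 2 ≠ 0 then pvPosSwap cs sa ra else pvPosSwap cs ra sa)).length : Int) := by
  induction cs generalizing n sa ra ts tr locs vis with
  | nil =>
    simp only [PySem.List.enumerate_nil, List.foldl_nil, pvPosSwap, ite_self]
    omega
  | cons c cs ih =>
    have hcd : c = '<' ∨ c = '>' ∨ c = 'v' ∨ c = '^' := hc c (by simp)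
    have hrest : ∀ x ∈ cs, x = '<' ∨ x = '>' ∨ x = 'v' ∨ x = '^' :=
      fun x hx => hc x (by simp [hx])
    have hd := pv_delta_eq c hcd
    simp only [PySem.List.enumerate_cons, List.foldl_cons]
    by_cases hpar : PySem.Int.mod n 2 ≠ 0
    · -- odd index: santa (the current first mover) moves
      have hpar' : PySem.Int.mod (n + 1) 2 = 0 := (pv_parity n).mp hpar
      rw [if_pos hpar,
        show pvPosSwap (c :: cs) sa ra
          = (sa.1 + (pvDeltaB c).1, sa.2 + (pvDeltaB c).2)
            :: pvPosSwap cs ra (sa.1 + (pvDeltaB c).1, sa.2 + (pvDeltaB c).2) from rfl,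
        List.foldl_cons]
      by_cases hmem : locs.contains (sa.1 + (pvDeltaB c).1, sa.2 + (pvDeltaB c).2) = true
      · have hsA : pvStepA ((sa.1, sa.2, ts), (ra.1, ra.2, tr), locs) (n, c)
            = ((sa.1 + (pvDeltaB c).1, sa.2 + (pvDeltaB c).2, ts), (ra.1, ra.2, tr), locs) := by
          simp only [pvStepA, pvMoveA, hd]
          rw [if_pos hpar, if_pos hmem]
        have hvm : (sa.1 + (pvDeltaB c).1, sa.2 + (pvDeltaB c).2) ∈ vis := by
          rw [hv]; exact (PySem.Dict.contains_iff_mem_keys locs _).mp hmem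
        rw [hsA, PySem.Set.add_of_mem hvm]
        have := ih hrest (n + 1) (sa.1 + (pvDeltaB c).1, sa.2 + (pvDeltaB c).2) ra ts tr locs vis hv ht
        rw [if_neg (fun h => h hpar')] at this
        simpa using this
      · have hmem' : locs.contains (sa.1 + (pvDeltaB c).1, sa.2 + (pvDeltaB c).2) = false := by
          simpa using hmem
        have hsA : pvStepA ((sa.1, sa.2, ts), (ra.1, ra.2, tr), locs) (n, c)
            = ((sa.1 + (pvDeltaB c).1, sa.2 + (pvDeltaB c).2, ts + 1), (ra.1, ra.2, tr),
                locs.insert (sa.1 + (pvDeltaB c).1, sa.2 + (pvDeltaB c).2) (sa.1 + (pvDeltaB c).1, sa.2 + (pvDeltaB c).2)) := by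
          simp only [pvStepA, pvMoveA, hd]
          rw [if_pos hpar, if_neg (by simp [hmem'])]
        have hnm : (sa.1 + (pvDeltaB c).1, sa.2 + (pvDeltaB c).2) ∉ vis := by
          rw [hv]
          exact fun h => by simp [(PySem.Dict.contains_iff_mem_keys locs _).mpr h] at hmem'
        have hkeys := PySem.Dict.keys_insert_of_not_contains locs
          (sa.1 + (pvDeltaB c).1, sa.2 + (pvDeltaB c).2) hmem'
        rw [hsA, PySem.Set.add_of_not_mem hnm]
        have := ih hrest (n + 1) (sa.1 + (pvDeltaB c).1, sa.2 + (pvDeltaB c).2) ra (ts + 1) tr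
          (locs.insert (sa.1 + (pvDeltaB c).1, sa.2 + (pvDeltaB c).2) (sa.1 + (pvDeltaB c).1, sa.2 + (pvDeltaB c).2))
          (vis ++ [(sa.1 + (pvDeltaB c).1, sa.2 + (pvDeltaB c).2)])
          (by rw [hkeys, hv])
          (by simp only [List.length_append, List.length_cons, List.length_nil]; push_cast; omega)
        rw [if_neg (fun h => h hpar')] at this
        simpa using this
    · -- even index: robo-santa moves
      have hpe : PySem.Int.mod (n + 1) 2 ≠ 0 := by
        have h2 : PySem.Int.mod n 2 = 0 := by simpa using hpar
        simp only [PySem.Int.mod_eq_emod_of_pos (show (0:Int) < 2 by norm_num)] at h2 ⊢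
        omega
      rw [if_neg hpar,
        show pvPosSwap (c :: cs) ra sa
          = (ra.1 + (pvDeltaB c).1, ra.2 + (pvDeltaB c).2)
            :: pvPosSwap cs sa (ra.1 + (pvDeltaB c).1, ra.2 + (pvDeltaB c).2) from rfl,
        List.foldl_cons]
      by_cases hmem : locs.contains (ra.1 + (pvDeltaB c).1, ra.2 + (pvDeltaB c).2) = true
      · have hsA : pvStepA ((sa.1, sa.2, ts), (ra.1, ra.2, tr), locs) (n, c)
            = ((sa.1, sa.2, ts), (ra.1 + (pvDeltaB c).1, ra.2 + (pvDeltaB c).2, tr), locs) := by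
          simp only [pvStepA, pvMoveA, hd]
          rw [if_neg hpar, if_pos hmem]
        have hvm : (ra.1 + (pvDeltaB c).1, ra.2 + (pvDeltaB c).2) ∈ vis := by
          rw [hv]; exact (PySem.Dict.contains_iff_mem_keys locs _).mp hmem
        rw [hsA, PySem.Set.add_of_mem hvm]
        have := ih hrest (n + 1) sa (ra.1 + (pvDeltaB c).1, ra.2 + (pvDeltaB c).2) ts tr locs vis hv ht
        rw [if_pos hpe] at this
        simpa using this
      · have hmem' : locs.contains (ra.1 + (pvDeltaB c).1, ra.2 + (pvDeltaB c).2) = false := by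
          simpa using hmem
        have hsA : pvStepA ((sa.1, sa.2, ts), (ra.1, ra.2, tr), locs) (n, c)
            = ((sa.1, sa.2, ts), (ra.1 + (pvDeltaB c).1, ra.2 + (pvDeltaB c).2, tr + 1),
                locs.insert (ra.1 + (pvDeltaB c).1, ra.2 + (pvDeltaB c).2) (ra.1 + (pvDeltaB c).1, ra.2 + (pvDeltaB c).2)) := by
          simp only [pvStepA, pvMoveA, hd]
          rw [if_neg hpar, if_neg (by simp [hmem'])]
        have hnm : (ra.1 + (pvDeltaB c).1, ra.2 + (pvDeltaB c).2) ∉ vis := by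
          rw [hv]
          exact fun h => by simp [(PySem.Dict.contains_iff_mem_keys locs _).mpr h] at hmem'
        have hkeys := PySem.Dict.keys_insert_of_not_contains locs
          (ra.1 + (pvDeltaB c).1, ra.2 + (pvDeltaB c).2) hmem'
        rw [hsA, PySem.Set.add_of_not_mem hnm]
        have := ih hrest (n + 1) sa (ra.1 + (pvDeltaB c).1, ra.2 + (pvDeltaB c).2) ts (tr + 1)
          (locs.insert (ra.1 + (pvDeltaB c).1, ra.2 + (pvDeltaB c).2) (ra.1 + (pvDeltaB c).1, ra.2 + (pvDeltaB c).2))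
          (vis ++ [(ra.1 + (pvDeltaB c).1, ra.2 + (pvDeltaB c).2)])
          (by rw [hkeys, hv])
          (by simp only [List.length_append, List.length_cons, List.length_nil]; push_cast; omega)
        rw [if_pos hpe] at this
        simpa using this

-- l[0::2] is pvEvens l
theorem pv_filterMap_evens {α : Type} (l : List α) :
    (List.range ((l.length + 1) / 2)).filterMap (fun k => l[2 * k]?) = pvEvens l := by
  induction l using pvEvens.induct with
  | case1 => simp [pvEvens]
  | case2 a => simp [pvEvens]
  | case3 a b t ih =>
    have hcount : ((a :: b :: t).length + 1) / 2 = (t.length + 1) / 2 + 1 := by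
      simp only [List.length_cons]; omega
    rw [hcount, List.range_succ_eq_map, List.filterMap_cons, List.filterMap_map]
    simp only [Nat.mul_zero, List.getElem?_cons_zero]
    have hfun : ((fun k => (a :: b :: t)[2 * k]?) ∘ Nat.succ) = (fun k => t[2 * k]?) := by
      funext k
      simp only [Function.comp]
      have h2 : 2 * Nat.succ k = (2 * k) + 1 + 1 := by omega
      rw [h2, List.getElem?_cons_succ, List.getElem?_cons_succ]
    rw [hfun, ih]
    rfl

theorem pv_slice_evens {α : Type} (l : List α) :
    PySem.List.slice? l (some 0) none 2 = some (pvEvens l) := by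
  simp only [PySem.List.slice?, PySem.List.sliceIndices]
  norm_num
  have h1 : (if 0 < l.length then (((l.length : Int) + 2 - 1) / 2).toNat else 0)
      = (l.length + 1) / 2 := by
    split_ifs with h <;> omega
  rw [h1, ← pv_filterMap_evens l]
  apply List.filterMap_congr
  intro k hk
  congr 1

theorem pv_slice_odds {α : Type} (l : List α) :
    PySem.List.slice? l (some 1) none 2 = some (pvEvens l.tail) := by
  simp only [PySem.List.slice?, PySem.List.sliceIndices]
  norm_num
  cases l with
  | nil => simp [pvEvens]
  | cons a t =>
    have hmin : min (1 : Int) ((a :: t).length : Int) = 1 := by simp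
    have h1 : (if 1 < (a :: t).length then
        (((((a :: t).length : Int)) - min 1 (((a :: t).length : Int)) + 2 - 1) / 2).toNat else 0)
        = (t.length + 1) / 2 := by
      rw [hmin]; simp only [List.length_cons]; split_ifs with h <;> push_cast <;> omega
    rw [List.tail_cons, h1, ← pv_filterMap_evens t]
    simp only [hmin]
    apply List.filterMap_congr
    intro k hk
    have h2 : ((1 : Int) + 2 * (k : Int)).toNat = 2 * k + 1 := by omega
    rw [h2, List.getElem?_cons_succ]

-- pvPathB is origin :: pvPos1
theorem pv_pathB_acc (m : List Char) (p : Int × Int) (acc : List (Int × Int)) :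
    (m.foldl
      (fun st c =>
        let d := pvDeltaB c
        let x := st.1.1 + d.1
        let y := st.1.2 + d.2
        ((x, y), st.2 ++ [(x, y)])) (p, acc)).2 = acc ++ pvPos1 m p := by
  induction m generalizing p acc with
  | nil => simp [pvPos1]
  | cons c m ih =>
    simp only [List.foldl_cons, pvPos1]
    rw [ih]
    simp

theorem pv_pathB (m : List Char) :
    pvPathB m = ((0 : Int), (0 : Int)) :: pvPos1 m (0, 0) := by
  unfold pvPathB
  rw [pv_pathB_acc]
  simp

-- ===== VERDICT (by name: the statement is the Claim_ definition above) =====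
theorem solution_spec : Claim_equal_solution := by
  intro file_lines _ hpre
  unfold Spec_solution
  obtain ⟨hne, hchars⟩ := hpre
  cases file_lines with
  | nil => simp at hne
  | cons line rest =>
    have hget : PySem.List.pyGet? (line :: rest) (0 : Int) = some line := by
      simp [PySem.List.pyGet?, PySem.List.pyIdx?]
    unfold solution solution_alt
    rw [hget]
    dsimp only
    have hc : ∀ c ∈ line.toList, c = '<' ∨ c = '>' ∨ c = 'v' ∨ c = '^' := by
      have h : ∀ x ∈ line.toList, ((x = '<' ∨ x = '>') ∨ x = 'v') ∨ x = '^' := by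
        simpa using hchars
      intro c hcm
      have := h c hcm
      tauto
    -- A side
    have hA := pv_A_fold line.toList hc 1 (0, 0) (0, 0) 0 0
      (PySem.Dict.ofList [(((0 : Int), (0 : Int)), ((0 : Int), (0 : Int)))])
      ([((0 : Int), (0 : Int))]) (by rfl) (by simp)
    rw [if_pos (by decide)] at hA
    -- B side
    rw [pv_slice_evens, pv_slice_odds]
    simp only [Option.getD_some]
    rw [pv_pathB, pv_pathB]
    have hA' := hA
    simp only [] at hA' ⊢
    rw [hA']
    -- both are lengths of nodup lists with the same members
    have hperm := pv_swap_perm line.toList (0, 0) (0, 0)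
    have hsL : (List.foldl PySem.Set.add [((0 : Int), (0 : Int))]
        (pvPosSwap line.toList (0, 0) (0, 0))).Nodup :=
      pv_nodup_foldl_add _ _ (by simp)
    have hsR : (PySem.Set.union
        (PySem.Set.ofList (((0 : Int), (0 : Int)) :: pvPos1 (pvEvens line.toList) (0, 0)))
        (PySem.Set.ofList (((0 : Int), (0 : Int)) :: pvPos1 (pvEvens line.toList.tail) (0, 0)))).Nodup :=
      PySem.Set.nodup_union _ _ (PySem.Set.nodup_ofList _)
    have hmem : ∀ x, x ∈ List.foldl PySem.Set.add [((0 : Int), (0 : Int))]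
        (pvPosSwap line.toList (0, 0) (0, 0)) ↔
        x ∈ PySem.Set.union
          (PySem.Set.ofList (((0 : Int), (0 : Int)) :: pvPos1 (pvEvens line.toList) (0, 0)))
          (PySem.Set.ofList (((0 : Int), (0 : Int)) :: pvPos1 (pvEvens line.toList.tail) (0, 0))) := by
      intro x
      rw [pv_mem_foldl_add, PySem.Set.mem_union, PySem.Set.mem_ofList, PySem.Set.mem_ofList,
        hperm.mem_iff]
      simp only [List.mem_append, List.mem_cons]
      tauto
    exact congrArg Int.ofNat (pv_len_eq _ _ hsL hsR hmem)
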